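-- pv_equiv track=rewrite | github.com/Yashwanth-Karumanchi/Phishing-Website-Detection | utils.py | remove_protocol_and_www
-- ===== SOURCE A (Python) =====
-- def remove_protocol_and_www(url):
--     protocols = ['https://', 'http://']
--     for protocol in protocols:
--         if url.startswith(protocol):
--             url = url[len(protocol):]
--
--     if url.startswith('www.'):
--         url = url[len('www.'):]
--
--     return url
-- ===== SOURCE B (Python) =====
-- import re
--
-- _PREFIX_RE = re.compile(r'^(?:https?://)?(?:www\.)?')
--
-- def remove_protocol_and_www(url):
--     return _PREFIX_RE.sub('', url, count=1)
-- ===== Notes on version B (the rewrite author's own statement) =====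
-- stated objective: idiomatic
-- what changed: Replaces the loop over protocol literals and the conditional slices with a single anchored regex substitution stripping an optional protocol and an optional www. prefix.
-- intended difference: On URLs that begin with both protocol prefixes in a row (https then http), A strips both protocols while B strips only the first one, leaving the second protocol intact; stripping a single protocol is the intended behaviour, the double strip is an accident of A's loop over the two protocol literals. — e.g. on remove_protocol_and_www("https://http://x"): A returns "x", B returns "http://x"
import Mathlib
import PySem

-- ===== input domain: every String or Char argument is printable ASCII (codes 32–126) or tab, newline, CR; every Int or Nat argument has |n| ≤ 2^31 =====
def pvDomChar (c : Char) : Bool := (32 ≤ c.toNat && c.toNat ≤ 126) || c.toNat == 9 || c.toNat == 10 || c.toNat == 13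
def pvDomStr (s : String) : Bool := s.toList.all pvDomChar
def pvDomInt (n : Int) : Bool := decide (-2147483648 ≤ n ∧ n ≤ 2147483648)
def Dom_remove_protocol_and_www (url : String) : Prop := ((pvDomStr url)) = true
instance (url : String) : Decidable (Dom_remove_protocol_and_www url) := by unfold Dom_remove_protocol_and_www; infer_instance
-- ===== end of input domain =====

-- B strips the prefixes with one anchored regex substitution (idiomatic); on URLs starting
-- with 'https://http://' it strips a single protocol where A's loop strips two.

-- ===== PORT A =====
def remove_protocol_and_www (url : String) : String :=
  -- for protocol in ['https://', 'http://']: if url.startswith(protocol): url = url[len(protocol):]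
  let url := List.foldl
    (fun u protocol =>
      if PySem.Str.startswith u protocol then
        PySem.Str.slice u (some (PySem.Str.len protocol)) none
      else u)
    url ["https://", "http://"]
  -- if url.startswith('www.'): url = url[len('www.'):]
  if PySem.Str.startswith url "www." then
    PySem.Str.slice url (some (PySem.Str.len "www.")) none
  else url

-- ===== PORT B =====
-- Hand port of the anchored regex r'^(?:https?://)?(?:www\.)?' with sub(count=1): the
-- optional group (?:https?://) matches exactly when the string starts with 'https://' or
-- 'http://' (consuming that prefix), then (?:www\.) optionally consumes 'www.'; exact.
def remove_protocol_and_www_alt (url : String) : String :=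
  let l := url.toList
  let l := if "https://".toList.isPrefixOf l then l.drop 8
           else if "http://".toList.isPrefixOf l then l.drop 7
           else l
  let l := if "www.".toList.isPrefixOf l then l.drop 4 else l
  String.ofList l

-- ===== PRECONDITION & SPEC =====
-- On URLs that begin with both protocol prefixes in a row (https then http), A strips
-- both protocols while B strips only the first one, leaving the second protocol intact;
-- stripping a single protocol is the intended behaviour, the double strip is an accident
-- of A's loop over the two protocol literals.
def D_remove_protocol_and_www (url : String) : Prop :=
  "https://http://".toList.isPrefixOf url.toList = true
instance (url : String) : Decidable (D_remove_protocol_and_www url) := by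
  unfold D_remove_protocol_and_www; infer_instance

def Spec_remove_protocol_and_www (url : String) (out : String) : Prop :=
  ¬ D_remove_protocol_and_www url → out = remove_protocol_and_www_alt url
instance (url : String) (out : String) : Decidable (Spec_remove_protocol_and_www url out) := by unfold Spec_remove_protocol_and_www; infer_instance

def pvDiffWitness_remove_protocol_and_www : String := "https://http://x"
def pvDiffWitnessOut_remove_protocol_and_www : String × String := ("x", "http://x")

-- ===== CLAIM (what is proved, stated in full; the proofs are below) =====
def Claim_unchanged_remove_protocol_and_www : Prop := ∀ (url : String), Dom_remove_protocol_and_www url → Spec_remove_protocol_and_www url (remove_protocol_and_www url)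
def Claim_changed_remove_protocol_and_www : Prop := Dom_remove_protocol_and_www (pvDiffWitness_remove_protocol_and_www) ∧ D_remove_protocol_and_www (pvDiffWitness_remove_protocol_and_www) ∧ remove_protocol_and_www (pvDiffWitness_remove_protocol_and_www) = pvDiffWitnessOut_remove_protocol_and_www.1 ∧ remove_protocol_and_www_alt (pvDiffWitness_remove_protocol_and_www) = pvDiffWitnessOut_remove_protocol_and_www.2 ∧ pvDiffWitnessOut_remove_protocol_and_www.1 ≠ pvDiffWitnessOut_remove_protocol_and_www.2
def Claim_exact_remove_protocol_and_www : Prop := ∀ (url : String), Dom_remove_protocol_and_www url → D_remove_protocol_and_www url → remove_protocol_and_www url ≠ remove_protocol_and_www_alt url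

-- ===== LEMMAS AND PROOFS =====
-- A's single conditional strip, over List Char: 'if lit is a prefix, drop it'.
def stripOpt (lit : List Char) (s : List Char) : List Char :=
  if lit.isPrefixOf s then s.drop lit.length else s

lemma stepA_toList (u p : String) :
    (if PySem.Str.startswith u p then
        PySem.Str.slice u (some (PySem.Str.len p)) none
      else u).toList = stripOpt p.toList u.toList := by
  by_cases h : p.toList <+: u.toList
  · have hb : PySem.Str.startswith u p = true := by
      rw [PySem.Str.startswith_eq]; exact (PySem.Chars.startswith_iff u.toList p.toList).mpr h
    have hp : p.toList.isPrefixOf u.toList = true := List.isPrefixOf_iff_prefix.mpr h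
    rw [if_pos hb, PySem.Str.toList_slice, PySem.Str.len_eq,
      PySem.Chars.slice_eq_listSlice, PySem.List.slice_from_natCast]
    unfold stripOpt
    rw [if_pos hp]
  · have hb : ¬ (PySem.Str.startswith u p = true) := by
      rw [PySem.Str.startswith_eq]
      intro hc
      exact h (((PySem.Chars.startswith_iff u.toList p.toList).mp hc))
    have hp : ¬ (p.toList.isPrefixOf u.toList = true) := by
      intro hc
      exact h (List.isPrefixOf_iff_prefix.mp hc)
    rw [if_neg hb]
    unfold stripOpt
    rw [if_neg hp]

-- A's full result, over List Char.
lemma portA_toList (url : String) :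
    (remove_protocol_and_www url).toList =
      stripOpt "www.".toList (stripOpt "http://".toList (stripOpt "https://".toList url.toList)) := by
  unfold remove_protocol_and_www
  simp only [List.foldl_cons, List.foldl_nil]
  rw [stepA_toList]
  congr 1
  rw [stepA_toList]
  congr 1
  exact stepA_toList url "https://"

lemma ofList_toList (l : List Char) : (String.ofList l).toList = l := by simp

-- ===== VERDICT (by name: the statement is the Claim_ definition above) =====
lemma stripOpt_length_le (lit s : List Char) : (stripOpt lit s).length ≤ s.length := by
  unfold stripOpt
  split_ifs <;> simp

-- the core equation over List Char, outside D_
lemma main_lists (L : List Char) (hnd : ¬ ("https://http://".toList <+: L)) :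
    stripOpt "www.".toList (stripOpt "http://".toList (stripOpt "https://".toList L)) =
      (let l := if "https://".toList.isPrefixOf L then L.drop 8
                else if "http://".toList.isPrefixOf L then L.drop 7
                else L
       if "www.".toList.isPrefixOf l then l.drop 4 else l) := by
  by_cases h1 : "https://".toList.isPrefixOf L
  · obtain ⟨t, ht⟩ := List.isPrefixOf_iff_prefix.mp h1
    subst ht
    have h2 : ¬ ("http://".toList.isPrefixOf t = true) := by
      intro hc
      apply hnd
      have he : "https://http://".toList = "https://".toList ++ "http://".toList := by decide
      rw [he]
      exact ((List.prefix_append_right_inj "https://".toList).mpr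
        (List.isPrefixOf_iff_prefix.mp hc))
    have hdrop : ("https://".toList ++ t).drop 8 = t := by
      simpa using List.drop_left "https://".toList t
    simp only [stripOpt, h1, if_true, show ("https://".toList).length = 8 from rfl,
      hdrop, h2, show ("www.".toList).length = 4 from rfl,
      show ("http://".toList).length = 7 from rfl]
    simp
  · simp only [stripOpt, h1, show ("www.".toList).length = 4 from rfl,
      show ("http://".toList).length = 7 from rfl]
    simp

-- ===== VERDICT (by name: the statement is the Claim_ definition above) =====
theorem remove_protocol_and_www_spec : Claim_unchanged_remove_protocol_and_www := by
  intro url _ hnd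
  apply String.toList_injective
  rw [portA_toList, main_lists url.toList (fun h => hnd (List.isPrefixOf_iff_prefix.mpr h))]
  simp only [remove_protocol_and_www_alt, ofList_toList]

theorem remove_protocol_and_www_changed : Claim_changed_remove_protocol_and_www := by
  unfold Claim_changed_remove_protocol_and_www; decide

theorem remove_protocol_and_www_tight : Claim_exact_remove_protocol_and_www := by
  intro url _ hd heq
  have hl : (remove_protocol_and_www url).toList = (remove_protocol_and_www_alt url).toList := by
    rw [heq]
  obtain ⟨t, ht⟩ := List.isPrefixOf_iff_prefix.mp hd
  have hsplit : url.toList = "https://".toList ++ ("http://".toList ++ t) := by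
    rw [← ht, show "https://http://".toList = "https://".toList ++ "http://".toList from by decide,
      List.append_assoc]
  -- A side: both protocols stripped
  have hA : (remove_protocol_and_www url).toList = stripOpt "www.".toList t := by
    rw [portA_toList, hsplit]
    have e1 : stripOpt "https://".toList ("https://".toList ++ ("http://".toList ++ t)) =
        "http://".toList ++ t := by
      unfold stripOpt
      rw [if_pos (List.isPrefixOf_iff_prefix.mpr (List.prefix_append _ _))]
      simpa using List.drop_left "https://".toList ("http://".toList ++ t)
    have e2 : stripOpt "http://".toList ("http://".toList ++ t) = t := by
      unfold stripOpt
      rw [if_pos (List.isPrefixOf_iff_prefix.mpr (List.prefix_append _ _))]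
      simpa using List.drop_left "http://".toList t
    rw [e1, e2]
  -- B side: one protocol stripped, result = "http://" ++ t
  have hB : (remove_protocol_and_www_alt url).toList = "http://".toList ++ t := by
    unfold remove_protocol_and_www_alt
    rw [ofList_toList, hsplit]
    rw [if_pos (List.isPrefixOf_iff_prefix.mpr (List.prefix_append _ _))]
    have hdrop : ("https://".toList ++ ("http://".toList ++ t)).drop 8 = "http://".toList ++ t := by
      simpa using List.drop_left "https://".toList ("http://".toList ++ t)
    rw [hdrop]
    rw [if_neg ?_]
    rw [show ("www.".toList) = 'w' :: "ww.".toList from by decide,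
      show ("http://".toList) = 'h' :: "ttp://".toList from by decide]
    simp [List.isPrefixOf]
  have hlen := congrArg List.length hl
  rw [hA, hB, List.length_append] at hlen
  have h7 : ("http://".toList).length = 7 := by decide
  have hle := stripOpt_length_le "www.".toList t
  omega
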